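-- pv_equiv track=rewrite | github.com/SchmitzMichael2018/myhomebro | backend/projects/services/proposal_learning.py | _phrase_count
-- ===== SOURCE A (Python) =====
-- from collections import Counter
-- from typing import Any, Iterable
--
-- def _safe_text(value: Any) -> str:
--     return "" if value is None else str(value).strip()
--
-- def _phrase_count(texts: Iterable[str], needles: Iterable[tuple[str, str]]) -> Counter:
--     counter: Counter = Counter()
--     for text in texts:
--         hay = _safe_text(text).lower()
--         if not hay:
--             continue
--         for key, needle in needles:
--             if needle in hay:
--                 counter[key] += 1
--     return counter
-- ===== SOURCE B (Python) =====
-- from collections import Counter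
-- from typing import Any, Iterable
--
--
-- def _phrase_count(texts: Iterable[str], needles: Iterable[tuple[str, str]]) -> Counter:
--     # Per text, build a hash set of every substring whose length is one of the
--     # (distinct) needle lengths, so each needle test is one set lookup instead
--     # of a substring scan of the whole text.
--     counter: Counter = Counter()
--     needles = list(needles)
--     lengths = list(dict.fromkeys(len(needle) for _key, needle in needles))
--     for text in texts:
--         hay = ("" if text is None else str(text).strip()).lower()
--         if not hay:
--             continue
--         n = len(hay)
--         subs = set()
--         for length in lengths:
--             for i in range(n - length + 1):
--                 subs.add(hay[i:i + length])
--         for key, needle in needles: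
--             if needle in subs:
--                 counter[key] += 1
--     return counter
-- ===== Notes on version B (the rewrite author's own statement) =====
-- stated objective: alternative
-- what changed: Each needle's containment test 'needle in hay' is replaced by a lookup in a per-text hash set of all substrings of hay whose length is one of the distinct needle lengths, built once per text; the counter updates are unchanged.
import Mathlib
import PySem

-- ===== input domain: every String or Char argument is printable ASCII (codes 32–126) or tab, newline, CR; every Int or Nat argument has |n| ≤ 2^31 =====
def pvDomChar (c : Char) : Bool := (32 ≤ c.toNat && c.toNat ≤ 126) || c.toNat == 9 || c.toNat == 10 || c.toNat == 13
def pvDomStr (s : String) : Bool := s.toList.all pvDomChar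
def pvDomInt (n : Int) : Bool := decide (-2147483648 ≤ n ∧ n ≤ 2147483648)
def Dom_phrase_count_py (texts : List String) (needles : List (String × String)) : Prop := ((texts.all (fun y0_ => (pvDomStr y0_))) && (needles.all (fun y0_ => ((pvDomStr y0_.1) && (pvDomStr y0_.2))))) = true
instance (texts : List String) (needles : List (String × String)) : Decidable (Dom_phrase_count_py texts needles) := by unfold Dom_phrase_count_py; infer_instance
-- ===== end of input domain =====

-- B replaces each per-needle substring scan by a lookup in a per-text set of all
-- substrings of the haystack up to the maximum needle length (an index built once
-- per text); the counter updates are unchanged. Objective: alternative algorithm.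


-- ===== PORT A =====
-- _safe_text(value) for a str argument: str(value).strip() = value.strip()
def pv_safe_text (value : String) : String := PySem.Str.strip value

def phrase_count_py (texts : List String) (needles : List (String × String)) : List (String × Int) :=
  (texts.foldl (fun counter text =>
    let hay := PySem.Str.lower (pv_safe_text text)
    if hay.toList = [] then counter   -- 'if not hay: continue'
    else needles.foldl (fun counter kn =>
      if PySem.Str.isIn kn.2 hay then PySem.Dict.modify counter kn.1 0 (· + 1) else counter) counter)
    (PySem.Dict.empty : PySem.Dict String Int)).items

-- ===== PORT B =====
-- subs = set of all substrings hay[i:i+length] for each distinct needle length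
def pvSubstrSet (hay : String) (lengths : List Int) : PySem.Set String :=
  let n := PySem.Str.len hay
  lengths.foldl (fun s length =>
    (PySem.List.pyRange 0 (n - length + 1) 1).foldl (fun s i =>
      PySem.Set.add s (PySem.Str.slice hay (some i) (some (i + length)))) s) PySem.Set.empty

def phrase_count_py_alt (texts : List String) (needles : List (String × String)) : List (String × Int) :=
  let lengths := PySem.List.dedup (needles.map (fun kn => PySem.Str.len kn.2))
  (texts.foldl (fun counter text =>
    let hay := PySem.Str.lower (PySem.Str.strip text)
    if hay.toList = [] then counter   -- 'if not hay: continue'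
    else
      let subs := pvSubstrSet hay lengths
      needles.foldl (fun counter kn =>
        if PySem.Set.contains subs kn.2 then PySem.Dict.modify counter kn.1 0 (· + 1) else counter) counter)
    (PySem.Dict.empty : PySem.Dict String Int)).items

-- ===== PRECONDITION & SPEC =====
def Spec_phrase_count_py (texts : List String) (needles : List (String × String)) (out : List (String × Int)) : Prop := out = phrase_count_py_alt texts needles
instance (texts : List String) (needles : List (String × String)) (out : List (String × Int)) : Decidable (Spec_phrase_count_py texts needles out) := by unfold Spec_phrase_count_py; infer_instance

-- ===== CLAIM (what is proved, stated in full; the proofs are below) =====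
def Claim_equal_phrase_count_py : Prop := ∀ (texts : List String) (needles : List (String × String)), Dom_phrase_count_py texts needles → Spec_phrase_count_py texts needles (phrase_count_py texts needles)

-- ===== LEMMAS AND PROOFS =====

-- membership in a fold of Set.add
theorem pv_mem_foldl_add {α β : Type} [BEq α] [LawfulBEq α] (l : List β) (f : β → α)
    (s : PySem.Set α) (x : α) :
    x ∈ l.foldl (fun s j => PySem.Set.add s (f j)) s ↔ x ∈ s ∨ ∃ j ∈ l, x = f j := by
  induction l generalizing s with
  | nil => simp
  | cons hd tl ih =>
    simp only [List.foldl_cons, ih, PySem.Set.mem_add, List.mem_cons]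
    constructor
    · rintro ((h | h) | ⟨j, hj, hx⟩)
      · exact Or.inl h
      · exact Or.inr ⟨hd, Or.inl rfl, h⟩
      · exact Or.inr ⟨j, Or.inr hj, hx⟩
    · rintro (h | ⟨j, (rfl | hj), hx⟩)
      · exact Or.inl (Or.inl h)
      · exact Or.inl (Or.inr hx)
      · exact Or.inr ⟨j, hj, hx⟩

-- membership in the nested fold building pvSubstrSet
theorem pv_mem_foldl_foldl_add {α : Type} [BEq α] [LawfulBEq α] (l : List Int)
    (g : Int → List Int) (f : Int → Int → α) (s : PySem.Set α) (x : α) :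
    x ∈ l.foldl (fun s i => (g i).foldl (fun s j => PySem.Set.add s (f i j)) s) s ↔
      x ∈ s ∨ ∃ i ∈ l, ∃ j ∈ g i, x = f i j := by
  induction l generalizing s with
  | nil => simp
  | cons hd tl ih =>
    simp only [List.foldl_cons, ih, pv_mem_foldl_add, List.mem_cons]
    constructor
    · rintro ((h | h) | ⟨i, hi, hj⟩)
      · exact Or.inl h
      · exact Or.inr ⟨hd, Or.inl rfl, h⟩
      · exact Or.inr ⟨i, Or.inr hi, hj⟩
    · rintro (h | ⟨i, (rfl | hi), hj⟩)
      · exact Or.inl (Or.inl h)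
      · exact Or.inl (Or.inr hj)
      · exact Or.inr ⟨i, hi, hj⟩

theorem pv_mem_substrSet (hay : String) (lengths : List Int) (x : String) :
    x ∈ pvSubstrSet hay lengths ↔
      ∃ length ∈ lengths,
        ∃ i ∈ PySem.List.pyRange 0 (PySem.Str.len hay - length + 1) 1,
          x = PySem.Str.slice hay (some i) (some (i + length)) := by
  unfold pvSubstrSet
  rw [pv_mem_foldl_foldl_add]
  simp [PySem.Set.empty]

-- the index answers exactly the containment question, for needles whose length is indexed
theorem pv_contains_substrSet (hay needle : String) (lengths : List Int)
    (hpos : ∀ L ∈ lengths, 0 ≤ L) (h : PySem.Str.len needle ∈ lengths) :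
    PySem.Set.contains (pvSubstrSet hay lengths) needle = PySem.Str.isIn needle hay := by
  rw [Bool.eq_iff_iff, PySem.Set.contains_iff, pv_mem_substrSet,
      PySem.Str.isIn_eq, ← PySem.Chars.exists_prefix_drop_iff_isIn]
  constructor
  · rintro ⟨L, hL, i, hi, rfl⟩
    rw [PySem.List.mem_pyRange_one] at hi
    have hi0 : (0:Int) ≤ i := hi.1
    have hL0 : (0:Int) ≤ L := hpos L hL
    refine ⟨i.toNat, ?_⟩
    rw [PySem.Str.toList_slice, PySem.Chars.slice_eq_listSlice]
    rw [show (i : Int) = ((i.toNat : Nat) : Int) by omega,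
        show (L : Int) = ((L.toNat : Nat) : Int) by omega,
        PySem.List.slice_natCast_add]
    exact List.take_prefix _ _
  · rintro ⟨k, hk⟩
    have hlen := hk.length_le
    rw [List.length_drop] at hlen
    set nn := hay.toList.length with hnn
    set m := needle.toList.length with hm
    have hk' : needle.toList <+: hay.toList.drop (min k nn) := by
      by_cases hle : k ≤ nn
      · rwa [min_eq_left hle]
      · have : needle.toList = [] := by
          have : nn - k = 0 := by omega
          rw [this] at hlen
          exact List.eq_nil_of_length_eq_zero (by omega)
        simp [this]
    set i := min k nn with hi
    have him : m ≤ nn - i := by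
      have := hk'.length_le
      rw [List.length_drop] at this
      omega
    rw [PySem.Str.len_eq, ← hm] at h
    refine ⟨(m : Int), h, (i : Int), ?_, ?_⟩
    · rw [PySem.List.mem_pyRange_one, PySem.Str.len_eq, ← hnn]
      constructor <;> [positivity; omega]
    · apply String.toList_inj.mp
      rw [PySem.Str.toList_slice, PySem.Chars.slice_eq_listSlice,
          PySem.List.slice_natCast_add]
      rw [List.prefix_iff_eq_take] at hk'
      exact hk'

-- the per-text inner loops agree once every needle's length is in the index
theorem pv_inner_eq (needles : List (String × String)) (hay : String)
    (counter : PySem.Dict String Int) :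
    needles.foldl (fun counter kn =>
      if PySem.Str.isIn kn.2 hay then PySem.Dict.modify counter kn.1 0 (· + 1) else counter) counter
    = needles.foldl (fun counter kn =>
      if PySem.Set.contains (pvSubstrSet hay
          (PySem.List.dedup (needles.map (fun kn => PySem.Str.len kn.2)))) kn.2
        then PySem.Dict.modify counter kn.1 0 (· + 1) else counter) counter := by
  apply PySem.List.foldl_congr_mem
  intro acc kn hkn
  rw [pv_contains_substrSet _ _ _ ?_ ?_]
  · intro L hL
    rw [PySem.List.mem_dedup] at hL
    obtain ⟨kn', _, rfl⟩ := List.mem_map.mp hL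
    rw [PySem.Str.len_eq]
    positivity
  · rw [PySem.List.mem_dedup]
    exact List.mem_map.mpr ⟨kn, hkn, rfl⟩

-- ===== VERDICT (by name: the statement is the Claim_ definition above) =====
theorem phrase_count_py_spec : Claim_equal_phrase_count_py := by
  intro texts needles _
  unfold Spec_phrase_count_py phrase_count_py phrase_count_py_alt pv_safe_text
  refine congrArg PySem.Dict.items ?_
  apply PySem.List.foldl_congr_mem
  intro counter text _
  by_cases h : (PySem.Str.lower (PySem.Str.strip text)).toList = []
  · simp only [h, if_true]
  · simp only [if_neg h]
    exact pv_inner_eq needles _ counter
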